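-- pv_equiv track=rewrite | github.com/AP-MI-2021/lab-4-Furca-Diana | main.py | nrpozcresc
-- ===== SOURCE A (Python) =====
-- def nrpozcresc(l):
--     """
--     Determina daca toate numerele pozitive dintr-o lista sunt in ordine crescatoare
--     :param l: lista de numere naturale
--     :return: True, daca numerele pozitive sunt in ordine crescatoare si False in caz contrar
--     """
--     rezultat = []
--     for x in l:
--         if x > 0:
--             rezultat.append(x)
--     for i in range(len(rezultat)-1):
--         if rezultat[i] > rezultat[i+1]:
--             return False
--     return True
-- ===== SOURCE B (Python) =====
-- def nrpozcresc(l):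
--     pos = [x for x in l if x > 0]
--     return pos == sorted(pos)
-- ===== Notes on version B (the rewrite author's own statement) =====
-- stated objective: idiomatic
-- what changed: Replaces the index-based adjacent-pair scan with comparing the list of positives against its sorted copy (pos == sorted(pos)).
import Mathlib
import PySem

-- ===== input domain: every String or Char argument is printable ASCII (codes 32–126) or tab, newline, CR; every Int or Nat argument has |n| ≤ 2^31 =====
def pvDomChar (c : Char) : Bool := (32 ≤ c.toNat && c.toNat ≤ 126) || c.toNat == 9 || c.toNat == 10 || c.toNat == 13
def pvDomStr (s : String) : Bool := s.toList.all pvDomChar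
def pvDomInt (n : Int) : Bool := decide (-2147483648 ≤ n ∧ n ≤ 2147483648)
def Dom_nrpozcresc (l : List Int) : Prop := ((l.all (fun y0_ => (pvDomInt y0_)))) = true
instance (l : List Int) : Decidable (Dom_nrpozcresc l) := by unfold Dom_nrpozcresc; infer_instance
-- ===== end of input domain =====

-- B checks the positives against their sorted copy instead of A's index-based adjacent-pair scan; same value everywhere (objective: idiomatic).

-- ===== PORT A =====
def nrpozcresc (l : List Int) : Bool :=
  -- rezultat = []; for x in l: if x > 0: rezultat.append(x)
  let rezultat := l.foldl (fun acc x => if x > 0 then acc ++ [x] else acc) []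
  -- for i in range(len(rezultat)-1): if rezultat[i] > rezultat[i+1]: return False
  -- (early 'return False' rendered as: all indices pass; indices are always in range, so pyGetD is exact)
  (PySem.List.pyRange 0 ((rezultat.length : Int) - 1) 1).all
    (fun i => !(decide (PySem.List.pyGetD rezultat i 0 > PySem.List.pyGetD rezultat (i + 1) 0)))

-- ===== PORT B =====
def nrpozcresc_alt (l : List Int) : Bool :=
  let pos := l.filter (fun x => decide (x > 0))
  decide (pos = PySem.List.sorted pos (fun x => x) false)

-- ===== PRECONDITION & SPEC =====
def Spec_nrpozcresc (l : List Int) (out : Bool) : Prop := out = nrpozcresc_alt l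
instance (l : List Int) (out : Bool) : Decidable (Spec_nrpozcresc l out) := by unfold Spec_nrpozcresc; infer_instance

-- ===== CLAIM (what is proved, stated in full; the proofs are below) =====
def Claim_equal_nrpozcresc : Prop := ∀ (l : List Int), Dom_nrpozcresc l → Spec_nrpozcresc l (nrpozcresc l)

-- ===== LEMMAS AND PROOFS =====

-- A's first loop builds exactly the filtered list.
theorem pv_foldl_filter (l : List Int) (acc : List Int) :
    l.foldl (fun acc x => if x > 0 then acc ++ [x] else acc) acc
      = acc ++ l.filter (fun x => decide (x > 0)) := by
  induction l generalizing acc with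
  | nil => simp
  | cons x t ih =>
    simp only [List.foldl_cons, List.filter_cons]
    by_cases hx : x > 0
    · simp [hx, ih]
    · simp [hx, ih]

-- A's index scan decides Pairwise (· ≤ ·).
theorem pv_scan_iff (r : List Int) :
    ((PySem.List.pyRange 0 ((r.length : Int) - 1) 1).all
        (fun i => !(decide (PySem.List.pyGetD r i 0 > PySem.List.pyGetD r (i + 1) 0))) = true)
      ↔ r.Pairwise (· ≤ ·) := by
  rw [← List.isChain_iff_pairwise, List.isChain_iff_getElem]
  simp only [List.all_eq_true, PySem.List.mem_pyRange_one, Bool.not_eq_eq_eq_not, Bool.not_true,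
    decide_eq_false_iff_not, not_lt]
  constructor
  · intro h i hi
    have h0 : (0:Int) ≤ (i:Int) := by positivity
    have h1 : (i:Int) < (r.length : Int) - 1 := by omega
    have := h (i:Int) ⟨h0, h1⟩
    rw [PySem.List.pyGetD_eq_getElem r 0 h0 (by omega),
         PySem.List.pyGetD_eq_getElem r 0 (by omega) (by omega)] at this
    convert this using 2
  · intro h i hi
    obtain ⟨h0, h1⟩ := hi
    have hlt : i.toNat + 1 < r.length := by omega
    have := h i.toNat hlt
    rw [PySem.List.pyGetD_eq_getElem r 0 h0 (by omega),
        PySem.List.pyGetD_eq_getElem r 0 (by omega) (by omega)]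
    convert this using 2
    omega

-- B's comparison with the sorted copy decides the same predicate.
theorem pv_sorted_iff (r : List Int) :
    (r = PySem.List.sorted r (fun x => x) false) ↔ r.Pairwise (· ≤ ·) := by
  constructor
  · intro h
    have := PySem.List.sorted_pairwise (xs := r) (key := fun x => x)
    rw [← h] at this
    exact this
  · intro h
    exact (PySem.List.sorted_eq_self_of_pairwise r (fun x => x) h).symm

-- ===== VERDICT (by name: the statement is the Claim_ definition above) =====
theorem nrpozcresc_spec : Claim_equal_nrpozcresc := by
  intro l _
  unfold Spec_nrpozcresc nrpozcresc nrpozcresc_alt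
  simp only [pv_foldl_filter, List.nil_append]
  set r := l.filter (fun x => decide (x > 0)) with hr
  rcases h : decide (r = PySem.List.sorted r (fun x => x) false) with _ | _
  · simp only [decide_eq_false_iff_not] at h
    rw [← Bool.not_eq_true]
    intro hc
    exact h ((pv_sorted_iff r).mpr ((pv_scan_iff r).mp hc))
  · simp only [decide_eq_true_eq] at h
    exact (pv_scan_iff r).mpr ((pv_sorted_iff r).mp h)
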